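-- pv_equiv track=rewrite | github.com/wberkhof/knowit | 2022/l3.py | cut_paper2
-- ===== SOURCE A (Python) =====
-- def cut_paper2 (pakker:list):
--     length = 0
--
--     for p in pakker:
--         if (p[0] + p[1]) <= 55:
--             length += min(p[0], p[1]) + p[2]
--         else:
--             length += 2*(min(p[0], p[1]) + p[2])
--
--     return(length)
-- ===== SOURCE B (Python) =====
-- def cut_paper2(pakker: list):
--     def piece(p):
--         v = min(p[0], p[1]) + p[2]
--         return v if p[0] + p[1] <= 55 else 2 * v
--
--     def go(xs):
--         if not xs:
--             return 0
--         if len(xs) == 1: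
--             return piece(xs[0])
--         mid = len(xs) // 2
--         return go(xs[:mid]) + go(xs[mid:])
--
--     return go(pakker)
-- ===== Notes on version B (the rewrite author's own statement) =====
-- stated objective: alternative
-- what changed: Replaces A's single left-to-right accumulator loop by a divide-and-conquer recursion: the list is split in halves, each half is summed recursively, and the two subtotals are added (correct because integer addition is associative).
import Mathlib
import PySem

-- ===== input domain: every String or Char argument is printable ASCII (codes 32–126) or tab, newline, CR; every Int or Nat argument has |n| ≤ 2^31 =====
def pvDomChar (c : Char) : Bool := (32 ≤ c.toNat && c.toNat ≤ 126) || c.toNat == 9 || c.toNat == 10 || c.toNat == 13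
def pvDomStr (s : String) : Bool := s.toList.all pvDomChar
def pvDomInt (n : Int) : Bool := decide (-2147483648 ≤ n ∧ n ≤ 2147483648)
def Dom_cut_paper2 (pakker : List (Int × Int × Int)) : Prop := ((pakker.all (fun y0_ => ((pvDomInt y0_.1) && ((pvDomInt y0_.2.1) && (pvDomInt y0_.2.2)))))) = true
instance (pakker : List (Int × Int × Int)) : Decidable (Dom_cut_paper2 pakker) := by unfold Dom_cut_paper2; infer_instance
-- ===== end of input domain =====

-- B replaces A's single accumulator loop with a divide-and-conquer recursion over halves; same O(n) cost, different decomposition.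


-- ===== PORT A =====
def cut_paper2 (pakker : List (Int × Int × Int)) : Int :=
  pakker.foldl (fun length p =>
    if p.1 + p.2.1 ≤ 55 then length + (min p.1 p.2.1 + p.2.2)
    else length + 2 * (min p.1 p.2.1 + p.2.2)) 0

-- ===== PORT B =====
def pvPiece (p : Int × Int × Int) : Int :=
  let v := min p.1 p.2.1 + p.2.2
  if p.1 + p.2.1 ≤ 55 then v else 2 * v

def pvGo (xs : List (Int × Int × Int)) : Int :=
  if _h0 : xs = [] then 0
  else if _h1 : xs.length = 1 then pvPiece xs[0]!
  else
    let mid := xs.length / 2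
    pvGo (xs.take mid) + pvGo (xs.drop mid)
termination_by xs.length
decreasing_by
  · have hne : xs.length ≠ 0 := fun h => _h0 (List.eq_nil_of_length_eq_zero h)
    simp only [List.length_take]
    omega
  · have hne : xs.length ≠ 0 := fun h => _h0 (List.eq_nil_of_length_eq_zero h)
    simp only [List.length_drop]
    omega

def cut_paper2_alt (pakker : List (Int × Int × Int)) : Int := pvGo pakker

-- ===== PRECONDITION & SPEC =====
def Spec_cut_paper2 (pakker : List (Int × Int × Int)) (out : Int) : Prop := out = cut_paper2_alt pakker
instance (pakker : List (Int × Int × Int)) (out : Int) : Decidable (Spec_cut_paper2 pakker out) := by unfold Spec_cut_paper2; infer_instance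

-- ===== CLAIM =====
def Claim_equal_cut_paper2 : Prop := ∀ (pakker : List (Int × Int × Int)), Dom_cut_paper2 pakker → Spec_cut_paper2 pakker (cut_paper2 pakker)

-- ===== LEMMAS AND PROOFS =====
lemma pvGo_eq_sum (xs : List (Int × Int × Int)) : pvGo xs = (xs.map pvPiece).sum := by
  induction xs using pvGo.induct with
  | case1 => simp [pvGo]
  | case2 xs h0 h1 =>
    rw [pvGo]
    simp only [dif_neg h0, dif_pos h1]
    cases xs with
    | nil => simp at h0
    | cons a t =>
      cases t with
      | nil => simp [pvPiece]
      | cons b u => simp at h1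
  | case3 xs h0 h1 mid ih1 ih2 =>
    rw [pvGo]
    simp only [dif_neg h0, dif_neg h1]
    rw [ih1, ih2, ← List.sum_append, ← List.map_append, List.take_append_drop]

lemma cut_paper2_shift (pakker : List (Int × Int × Int)) (acc : Int) :
    pakker.foldl (fun length p =>
      if p.1 + p.2.1 ≤ 55 then length + (min p.1 p.2.1 + p.2.2)
      else length + 2 * (min p.1 p.2.1 + p.2.2)) acc
    = acc + (pakker.map pvPiece).sum := by
  induction pakker generalizing acc with
  | nil => simp
  | cons p ps ih =>
    simp only [List.foldl_cons, List.map_cons, List.sum_cons]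
    rw [ih]
    unfold pvPiece
    split_ifs <;> ring

-- ===== VERDICT =====
theorem cut_paper2_spec : Claim_equal_cut_paper2 := by
  intro pakker _
  unfold Spec_cut_paper2 cut_paper2 cut_paper2_alt
  rw [cut_paper2_shift, pvGo_eq_sum]
  ring
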